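-- pv_equiv track=rewrite | github.com/Jumaruba/LeetCode | 409.py | get_sum_all_pairs
-- ===== SOURCE A (Python) =====
-- def get_sum_all_pairs(h, max_even):
--     pairs_all_sum = 0
--     for key,value in h.items():
--         if key != max_even:
--             if value % 2:
--                 pairs_all_sum += value-1
--             else:
--                 pairs_all_sum += value
--
--     return pairs_all_sum
-- ===== SOURCE B (Python) =====
-- def get_sum_all_pairs(h, max_even):
--     # Staged aggregates: sum(v - v%2) over values == sum(values) - (number of odd values),
--     # since v % 2 is 0 or 1 for every int in Python. Then remove the excluded key's term.
--     vals = list(h.values())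
--     s = sum(vals)
--     odds = len([v for v in vals if v % 2])
--     excl = h.get(max_even)
--     if excl is None:
--         return s - odds
--     return s - odds - (excl - excl % 2)
-- ===== Notes on version B (the rewrite author's own statement) =====
-- stated objective: alternative
-- what changed: Replaces A's single filtered loop with per-item parity branching by staged whole-dict aggregates using the identity sum(v - v%2) = sum(values) - count(odd values): one pass sums all values, a second counts odd values, and a dict lookup subtracts the excluded key's even-floored contribution afterwards.
import Mathlib
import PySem

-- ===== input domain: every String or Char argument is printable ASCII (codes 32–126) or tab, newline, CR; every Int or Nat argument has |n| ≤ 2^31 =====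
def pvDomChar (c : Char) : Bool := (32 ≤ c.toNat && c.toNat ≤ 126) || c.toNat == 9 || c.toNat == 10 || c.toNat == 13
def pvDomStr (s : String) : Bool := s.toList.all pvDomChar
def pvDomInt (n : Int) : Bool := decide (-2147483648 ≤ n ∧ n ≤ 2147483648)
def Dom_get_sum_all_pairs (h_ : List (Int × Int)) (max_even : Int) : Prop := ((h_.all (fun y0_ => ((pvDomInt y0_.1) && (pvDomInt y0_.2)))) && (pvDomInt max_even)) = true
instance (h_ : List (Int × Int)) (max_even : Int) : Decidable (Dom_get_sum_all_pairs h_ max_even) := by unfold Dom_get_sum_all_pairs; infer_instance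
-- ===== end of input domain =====

-- ===== PORT A =====
def get_sum_all_pairs (h_ : List (Int × Int)) (max_even : Int) : Int :=
  h_.foldl (fun pairs_all_sum kv =>
    if kv.1 ≠ max_even then
      if PySem.Int.mod kv.2 2 ≠ 0 then pairs_all_sum + (kv.2 - 1)
      else pairs_all_sum + kv.2
    else pairs_all_sum) 0

-- ===== PORT B =====
-- B: staged aggregates (sum of all values, count of odd values) and an after-the-fact
-- lookup correction for the excluded key; uses sum(v - v%2) = sum(values) - #odd.
def get_sum_all_pairs_alt (h_ : List (Int × Int)) (max_even : Int) : Int :=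
  let vals := h_.map Prod.snd
  let s := vals.foldl (· + ·) 0
  let odds : Int := (vals.filter (fun v => PySem.Int.mod v 2 ≠ 0)).length
  match (PySem.Dict.mk h_).get? max_even with
  | none => s - odds
  | some excl => s - odds - (excl - PySem.Int.mod excl 2)

-- ===== PRECONDITION & SPEC =====
-- Pre_ excludes assoc lists with duplicate keys: a Python dict cannot hold them, so on such
-- lists the assoc list does not faithfully represent A's dict input and the list port's value is accidental.
def Pre_get_sum_all_pairs (h_ : List (Int × Int)) (_max_even : Int) : Prop :=
  (h_.map Prod.fst).Nodup
instance (h_ : List (Int × Int)) (max_even : Int) : Decidable (Pre_get_sum_all_pairs h_ max_even) := by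
  unfold Pre_get_sum_all_pairs; infer_instance
def pvWitness_get_sum_all_pairs : (List (Int × Int)) × Int := ([(1, 3), (2, 4)], 1)

def Spec_get_sum_all_pairs (h_ : List (Int × Int)) (max_even : Int) (out : Int) : Prop := out = get_sum_all_pairs_alt h_ max_even
instance (h_ : List (Int × Int)) (max_even : Int) (out : Int) : Decidable (Spec_get_sum_all_pairs h_ max_even out) := by unfold Spec_get_sum_all_pairs; infer_instance

-- ===== CLAIM (what is proved, stated in full; the proofs are below) =====
def Claim_equal_get_sum_all_pairs : Prop := ∀ (h_ : List (Int × Int)) (max_even : Int), Dom_get_sum_all_pairs h_ max_even → Pre_get_sum_all_pairs h_ max_even → Spec_get_sum_all_pairs h_ max_even (get_sum_all_pairs h_ max_even)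

-- ===== LEMMAS AND PROOFS =====

-- even-floor of a value, the common summand
def efl (v : Int) : Int := v - PySem.Int.mod v 2

lemma mod_two_cases (v : Int) : PySem.Int.mod v 2 = 0 ∨ PySem.Int.mod v 2 = 1 := by
  unfold PySem.Int.mod
  rw [Int.fmod_eq_emod_of_nonneg _ (by norm_num)]
  exact Int.emod_two_eq_zero_or_one v

lemma efl_branch (v : Int) :
    (if PySem.Int.mod v 2 ≠ 0 then v - 1 else v) = efl v := by
  unfold efl
  have := mod_two_cases v
  split_ifs with h <;> omega

-- peel the accumulator off a foldl whose step is "add something depending only on the element"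
lemma foldl_shift {α : Type} (f : Int → α → Int) (hf : ∀ a x, f a x = a + f 0 x)
    (l : List α) (a : Int) : l.foldl f a = a + l.foldl f 0 := by
  induction l generalizing a with
  | nil => simp
  | cons x t ih =>
    simp only [List.foldl_cons]
    rw [ih (f a x), ih (f 0 x), hf a x]; ring

-- A's loop, head peeled off
lemma A_cons (kv : Int × Int) (t : List (Int × Int)) (me : Int) :
    get_sum_all_pairs (kv :: t) me =
      (if kv.1 ≠ me then efl kv.2 else 0) + get_sum_all_pairs t me := by
  unfold get_sum_all_pairs
  simp only [List.foldl_cons]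
  rw [foldl_shift _ (by intro a x; split_ifs <;> ring)]
  congr 1
  rw [← efl_branch kv.2]
  split_ifs <;> ring

-- B's staged aggregates equal the even-floored sum
def eflSum (l : List (Int × Int)) : Int := l.foldl (fun acc kv => acc + efl kv.2) 0

lemma eflSum_cons (kv : Int × Int) (t : List (Int × Int)) :
    eflSum (kv :: t) = efl kv.2 + eflSum t := by
  unfold eflSum
  simp only [List.foldl_cons]
  rw [foldl_shift _ (by intro a x; ring)]; ring

lemma staged_eq_eflSum (l : List (Int × Int)) :
    (l.map Prod.snd).foldl (· + ·) 0
      - (((l.map Prod.snd).filter (fun v => PySem.Int.mod v 2 ≠ 0)).length : Int)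
      = eflSum l := by
  induction l with
  | nil => simp [eflSum]
  | cons kv t ih =>
    rw [eflSum_cons]
    simp only [List.map_cons, List.foldl_cons, List.filter_cons]
    rw [foldl_shift (· + ·) (by intro a x; ring) (t.map Prod.snd) (0 + kv.2)]
    have := mod_two_cases kv.2
    by_cases h : PySem.Int.mod kv.2 2 = 0
    · rw [if_neg (by simp only [decide_eq_true_eq, ne_eq, not_not]; exact h)]
      unfold efl; omega
    · rw [if_pos (by simpa using h)]
      simp only [List.length_cons]
      unfold efl
      push_cast
      omega

-- if the excluded key does not occur, A sums every entry
lemma A_no_match (h_ : List (Int × Int)) (me : Int)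
    (hnm : me ∉ h_.map Prod.fst) :
    get_sum_all_pairs h_ me = eflSum h_ := by
  induction h_ with
  | nil => rfl
  | cons kv t ih =>
    simp only [List.map_cons, List.mem_cons, not_or] at hnm
    rw [A_cons, eflSum_cons, if_pos (by intro h; exact hnm.1 h.symm), ih hnm.2]

lemma alt_eq (h_ : List (Int × Int)) (me : Int) :
    get_sum_all_pairs_alt h_ me =
      (match (PySem.Dict.mk h_).get? me with
       | none => eflSum h_
       | some v => eflSum h_ - efl v) := by
  unfold get_sum_all_pairs_alt
  cases hg : (PySem.Dict.mk h_).get? me <;>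
    simp only [← staged_eq_eflSum h_, efl]

lemma A_eq_B (h_ : List (Int × Int)) (me : Int)
    (hpre : (h_.map Prod.fst).Nodup) :
    get_sum_all_pairs h_ me = get_sum_all_pairs_alt h_ me := by
  rw [alt_eq]
  induction h_ with
  | nil => rfl
  | cons kv t ih =>
    simp only [List.map_cons, List.nodup_cons] at hpre
    rw [A_cons, eflSum_cons, PySem.Dict.get?_mk_cons]
    by_cases hk : kv.1 = me
    · rw [if_neg (by simp [hk]), if_pos (by simpa using hk),
          A_no_match t me (hk ▸ hpre.1)]
      ring
    · rw [if_pos hk, if_neg (by simpa using hk), ih hpre.2]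
      cases hg : (PySem.Dict.mk t).get? me
      · ring
      · ring

-- ===== VERDICT (by name: the statement is the Claim_ definition above) =====
theorem get_sum_all_pairs_spec : Claim_equal_get_sum_all_pairs := by
  intro h_ max_even _ hpre
  unfold Spec_get_sum_all_pairs
  exact A_eq_B h_ max_even hpre
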